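-- pv_equiv track=rewrite | github.com/DAEUN9/TIL | Soving/programmers/level2/더맵게.py | solution
-- ===== SOURCE A (Python) =====
-- import heapq
--
-- def solution(scoville, K):
--     answer = 0
--     # 스코빌지수 힙큐로 바꾸기
--     heapq.heapify(scoville)
--     while True:
--         # 가장 맵지 않은 음식의 스코빌지수
--         fir = heapq.heappop(scoville)
--         # 모든 음식 스코빌지수가 K이상이면 리턴
--         if fir >= K:
--             return answer
--         # 남은 음식이 없으면
--         # K이상으로 만들 수 없어서 -1 리턴
--         if not len(scoville):
--             return -1
--         # 두번째로 맵지 않은 음식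
--         sec = heapq.heappop(scoville)
--         # 새로 만든 음식을 힙에 넣는다
--         heapq.heappush(scoville, fir+sec*2)
--         # 섞기 횟수 += 1
--         answer += 1
-- ===== SOURCE B (Python) =====
-- def _insort(s, x):
--     # insert x into sorted list s, after any equal elements (bisect_right position)
--     i = 0
--     while i < len(s) and s[i] <= x:
--         i += 1
--     s.insert(i, x)
--
-- def solution(scoville, K):
--     answer = 0
--     scoville.sort()
--     while True:
--         fir = scoville.pop(0)
--         if fir >= K:
--             return answer
--         if not scoville:
--             return -1
--         sec = scoville.pop(0)
--         _insort(scoville, fir + sec * 2)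
--         answer += 1
-- ===== Notes on version B (the rewrite author's own statement) =====
-- stated objective: idiomatic
-- what changed: Replaces the binary heap with a list sorted once up front, popping the two smallest from the front and re-inserting the mixed value at its sorted position by ordered insertion.
-- outside the precondition, e.g. on solution([], 1): A raises IndexError, B raises IndexError
import Mathlib
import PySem

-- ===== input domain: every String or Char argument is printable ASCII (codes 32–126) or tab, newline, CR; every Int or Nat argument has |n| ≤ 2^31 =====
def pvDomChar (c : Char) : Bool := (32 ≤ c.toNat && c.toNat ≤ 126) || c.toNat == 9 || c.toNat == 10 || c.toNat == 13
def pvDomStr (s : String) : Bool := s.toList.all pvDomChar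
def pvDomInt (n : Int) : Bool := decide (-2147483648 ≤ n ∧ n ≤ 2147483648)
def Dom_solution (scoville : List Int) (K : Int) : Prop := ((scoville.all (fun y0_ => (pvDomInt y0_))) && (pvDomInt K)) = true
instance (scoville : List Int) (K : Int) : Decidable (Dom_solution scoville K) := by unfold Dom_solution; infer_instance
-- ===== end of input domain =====

-- B replaces A's binary heap with a list sorted once up front, re-inserting each mix by ordered insertion (idiomatic, same return value).
-- Both Pythons mutate the argument list in place (A into heap order, B into sorted order with pops):
-- the equivalence proved here is about the RETURN value only.


-- ===== PORT A =====
-- heapq is ported by its semantics on the multiset the list holds: heappop extracts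
-- the minimum element, heappush adds one; the return value is exact (the in-place
-- binary-heap layout of the Python list is not modelled, only its contents).
def pvHeapMin (h : List Int) : Int := (PySem.List.min? h (fun x => x)).getD 0

theorem pvHeapMin_mem (h : List Int) (hne : h ≠ []) : pvHeapMin h ∈ h := by
  unfold pvHeapMin
  cases e : PySem.List.min? h (fun x => x) with
  | none => exact absurd ((PySem.List.min?_eq_none_iff h (fun x => x)).mp e) hne
  | some m => simpa using PySem.List.min?_mem e

def solutionLoop (h : List Int) (K answer : Int) : Int :=
  if hne : h = [] then 0  -- heappop on the empty list raises IndexError; excluded by Pre_solution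
  else -- fir = heappop(scoville); rest = remaining heap contents
    if pvHeapMin h ≥ K then answer
    else if hr : (h.erase (pvHeapMin h)).length = 0 then -1
    else -- sec = heappop(...), heappush(fir + sec*2), answer += 1
      solutionLoop ((h.erase (pvHeapMin h)).erase (pvHeapMin (h.erase (pvHeapMin h)))
          ++ [pvHeapMin h + pvHeapMin (h.erase (pvHeapMin h)) * 2]) K (answer + 1)
termination_by h.length
decreasing_by
  have h1 : pvHeapMin h ∈ h := pvHeapMin_mem h hne
  have h2 : pvHeapMin (h.erase (pvHeapMin h)) ∈ h.erase (pvHeapMin h) := by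
    apply pvHeapMin_mem
    intro hnil
    rw [hnil] at hr
    exact hr rfl
  have l1 := List.length_erase_of_mem h1
  have l2 := List.length_erase_of_mem h2
  have hpos : 0 < h.length := List.length_pos_of_ne_nil hne
  simp only [List.length_append, List.length_cons, List.length_nil]
  omega

def solution (scoville : List Int) (K : Int) : Int := solutionLoop scoville K 0

-- ===== PORT B =====
-- B keeps the list sorted: pop the two smallest from the front, insert the mix back in order.
def insort (xs : List Int) (x : Int) : List Int :=
  match xs with
  | [] => [x]
  | y :: ys => if y ≤ x then y :: insort ys x else x :: y :: ys

theorem length_insort (xs : List Int) (x : Int) : (insort xs x).length = xs.length + 1 := by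
  induction xs with
  | nil => rfl
  | cons y ys ih => by_cases h : y ≤ x <;> simp [insort, h, ih]

def solutionAltLoop (s : List Int) (K answer : Int) : Int :=
  match s with
  | [] => 0  -- pop(0) on the empty list raises IndexError; excluded by Pre_solution
  | fir :: rest =>
    if fir ≥ K then answer
    else match rest with
      | [] => -1
      | sec :: rest2 => solutionAltLoop (insort rest2 (fir + sec * 2)) K (answer + 1)
termination_by s.length
decreasing_by simp [length_insort]

def solution_alt (scoville : List Int) (K : Int) : Int :=
  solutionAltLoop (PySem.List.sorted scoville (fun x => x) false) K 0

-- ===== PRECONDITION & SPEC =====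
-- Pre_ excludes only the empty list, on which both Pythons raise IndexError.
def Pre_solution (scoville : List Int) (K : Int) : Prop := scoville ≠ []
instance (scoville : List Int) (K : Int) : Decidable (Pre_solution scoville K) := by unfold Pre_solution; infer_instance
def pvWitness_solution : List Int × Int := ([1, 2, 3, 9, 10, 12], 7)
def Spec_solution (scoville : List Int) (K : Int) (out : Int) : Prop := out = solution_alt scoville K
instance (scoville : List Int) (K : Int) (out : Int) : Decidable (Spec_solution scoville K out) := by unfold Spec_solution; infer_instance

-- ===== CLAIM (what is proved, stated in full; the proofs are below) =====
def Claim_equal_solution : Prop := ∀ (scoville : List Int) (K : Int), Dom_solution scoville K → Pre_solution scoville K → Spec_solution scoville K (solution scoville K)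

-- ===== LEMMAS AND PROOFS =====

theorem pvHeapMin_min (h : List Int) (hne : h ≠ []) : ∀ y ∈ h, pvHeapMin h ≤ y := by
  unfold pvHeapMin
  cases e : PySem.List.min? h (fun x => x) with
  | none => exact absurd ((PySem.List.min?_eq_none_iff h (fun x => x)).mp e) hne
  | some m => simpa using PySem.List.min?_isMin e

theorem insort_cons_le (y : Int) (ys : List Int) (x : Int) (h : y ≤ x) :
    insort (y :: ys) x = y :: insort ys x := by simp [insort, h]

theorem insort_cons_gt (y : Int) (ys : List Int) (x : Int) (h : ¬ y ≤ x) :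
    insort (y :: ys) x = x :: y :: ys := by simp [insort, h]

theorem insort_perm (xs : List Int) (x : Int) : (insort xs x).Perm (x :: xs) := by
  induction xs with
  | nil => simp [insort]
  | cons y ys ih =>
    by_cases h : y ≤ x
    · rw [insort_cons_le y ys x h]
      exact (ih.cons y).trans (List.Perm.swap x y ys)
    · rw [insort_cons_gt y ys x h]

theorem insort_pairwise (xs : List Int) (x : Int) (hs : xs.Pairwise (· ≤ ·)) :
    (insort xs x).Pairwise (· ≤ ·) := by
  induction xs with
  | nil => simp [insort]
  | cons y ys ih =>
    rcases List.pairwise_cons.mp hs with ⟨hy, hys⟩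
    by_cases h : y ≤ x
    · rw [insort_cons_le y ys x h]
      refine List.pairwise_cons.mpr ⟨?_, ih hys⟩
      intro z hz
      rcases List.mem_cons.mp ((insort_perm ys x).mem_iff.mp hz) with rfl | hz'
      · exact h
      · exact hy z hz'
    · rw [insort_cons_gt y ys x h]
      refine List.pairwise_cons.mpr ⟨?_, hs⟩
      intro z hz
      rcases List.mem_cons.mp hz with rfl | hz'
      · exact (not_le.mp h).le
      · exact le_trans (not_le.mp h).le (hy z hz')

-- head of a sorted permutation of h is the minimum of h
theorem head_eq_min (h : List Int) (fir : Int) (rest : List Int)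
    (hperm : (fir :: rest).Perm h) (hsort : (fir :: rest).Pairwise (· ≤ ·)) :
    fir = pvHeapMin h := by
  have hne : h ≠ [] := by
    intro hnil; subst hnil
    simpa using hperm.length_eq
  have h1 : pvHeapMin h ≤ fir :=
    pvHeapMin_min h hne fir (hperm.subset List.mem_cons_self)
  have h2 : fir ≤ pvHeapMin h := by
    have hm : pvHeapMin h ∈ fir :: rest := hperm.symm.subset (pvHeapMin_mem h hne)
    rcases List.mem_cons.mp hm with heq | hm'
    · omega
    · exact (List.pairwise_cons.mp hsort).1 _ hm'
  omega

theorem altLoop_cons (fir : Int) (rest : List Int) (K a : Int) :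
    solutionAltLoop (fir :: rest) K a =
      if fir ≥ K then a
      else match rest with
        | [] => -1
        | sec :: rest2 => solutionAltLoop (insort rest2 (fir + sec * 2)) K (a + 1) := by
  rw [solutionAltLoop.eq_def]

theorem loop_eq (n : ℕ) : ∀ (h s : List Int) (K a : Int), h.length ≤ n →
    s.Perm h → s.Pairwise (· ≤ ·) → h ≠ [] →
    solutionLoop h K a = solutionAltLoop s K a := by
  induction n with
  | zero =>
    intro h s K a hlen _ _ hne
    exact absurd (List.length_eq_zero_iff.mp (Nat.le_zero.mp hlen)) hne
  | succ n ih =>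
    intro h s K a hlen hperm hsort hne
    match s with
    | [] => exact absurd hperm.symm.eq_nil hne
    | fir :: rest =>
      have hfir : fir = pvHeapMin h := head_eq_min h fir rest hperm hsort
      have hrestperm : rest.Perm (h.erase fir) := by
        have := hperm.erase fir
        rwa [List.erase_cons_head] at this
      rw [altLoop_cons, solutionLoop]
      rw [dif_neg hne, ← hfir]
      by_cases hK : fir ≥ K
      · rw [if_pos hK, if_pos hK]
      · rw [if_neg hK, if_neg hK]
        cases rest with
        | nil =>
          have h0 : (h.erase fir).length = 0 := by simpa using hrestperm.symm.length_eq
          rw [dif_pos h0]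
        | cons sec rest2 =>
          have hlr : rest2.length + 1 = (h.erase fir).length := by
            simpa using hrestperm.length_eq
          rw [dif_neg (by omega)]
          have hsort' : (sec :: rest2).Pairwise (· ≤ ·) := (List.pairwise_cons.mp hsort).2
          have hsec : sec = pvHeapMin (h.erase fir) := head_eq_min _ sec rest2 hrestperm hsort'
          rw [← hsec]
          have hrest2perm : rest2.Perm ((h.erase fir).erase sec) := by
            have := hrestperm.erase sec
            rwa [List.erase_cons_head] at this
          refine ih _ _ K (a + 1) ?_ ?_ ?_ (by simp)
          · have hm : fir ∈ h := hperm.subset List.mem_cons_self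
            have l1 := List.length_erase_of_mem hm
            have hm2 : sec ∈ h.erase fir := hrestperm.subset List.mem_cons_self
            have l2 := List.length_erase_of_mem hm2
            simp only [List.length_append, List.length_cons, List.length_nil]
            omega
          · refine (insort_perm rest2 (fir + sec * 2)).trans ?_
            refine (hrest2perm.cons (fir + sec * 2)).trans ?_
            exact (List.perm_append_singleton _ _).symm
          · exact insort_pairwise rest2 (fir + sec * 2) (List.pairwise_cons.mp hsort').2

theorem sorted_pairwise_le (xs : List Int) :
    (PySem.List.sorted xs (fun x => x) false).Pairwise (· ≤ ·) := by
  simpa using PySem.List.sorted_pairwise (xs := xs) (key := fun x => x)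

-- ===== VERDICT (by name: the statement is the Claim_ definition above) =====
theorem solution_spec : Claim_equal_solution := by
  intro scoville K _ hpre
  unfold Spec_solution solution solution_alt
  exact loop_eq scoville.length scoville _ K 0 le_rfl
    (PySem.List.sorted_perm _ _ _) (sorted_pairwise_le scoville) hpre
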